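-- pv_equiv track=rewrite | github.com/addinedu-ros-5th/ros-repo-4 | main_control_server/src/task_allocator/src/module/TSP_Algorithms.py | distribute_items_among_robots
-- ===== SOURCE A (Python) =====
-- from collections import Counter
--
-- def distribute_items_among_robots(selected_items):
--     item_counts = Counter(selected_items)
--     robot1, robot2 = [], []
--
--     for item, count in item_counts.items():
--         while count > 0:
--             if len(robot1) < 3:
--                 robot1.append(item)
--             elif len(robot2) < 3:
--                 robot2.append(item)
--             else:
--                 break
--             count -= 1
--
--     return robot1, robot2
-- ===== SOURCE B (Python) =====
-- def distribute_items_among_robots(selected_items):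
--     first = {}
--     for i, x in enumerate(selected_items):
--         first.setdefault(x, i)
--     grouped = sorted(selected_items, key=first.get)
--     return grouped[:3], grouped[3:6]
-- ===== Notes on version B (the rewrite author's own statement) =====
-- stated objective: alternative
-- what changed: Replaces Counter-building plus the greedy per-item fill-and-break while loop with a stable sort of the whole list keyed by each element's first-occurrence index (recorded in one enumerate pass), then two slices; stability groups equal items in first-seen order, which is exactly Counter order.
import Mathlib
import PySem

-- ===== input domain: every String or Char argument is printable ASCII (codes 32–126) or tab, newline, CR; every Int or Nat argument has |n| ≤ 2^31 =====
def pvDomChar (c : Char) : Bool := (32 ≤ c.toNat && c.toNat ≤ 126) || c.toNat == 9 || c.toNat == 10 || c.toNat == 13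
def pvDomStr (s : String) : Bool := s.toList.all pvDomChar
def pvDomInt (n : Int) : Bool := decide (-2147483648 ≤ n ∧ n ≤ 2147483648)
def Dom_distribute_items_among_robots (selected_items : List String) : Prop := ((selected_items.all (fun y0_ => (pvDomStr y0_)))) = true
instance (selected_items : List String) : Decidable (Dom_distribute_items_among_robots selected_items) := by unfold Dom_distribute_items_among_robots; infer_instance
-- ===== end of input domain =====

-- B replaces A's Counter + greedy fill-and-break loop by a stable sort keyed by first-occurrence index, then two slices (alternative algorithm, same cost class).


-- ===== PORT A =====
-- the inner 'while count > 0: … else break' loop of A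
def pvFillA (item : String) (count : Int) (st : List String × List String) :
    List String × List String :=
  if _h : count > 0 then
    if st.1.length < 3 then pvFillA item (count - 1) (st.1 ++ [item], st.2)
    else if st.2.length < 3 then pvFillA item (count - 1) (st.1, st.2 ++ [item])
    else st
  else st
termination_by count.toNat
decreasing_by all_goals omega

def distribute_items_among_robots (selected_items : List String) : List String × List String :=
  let item_counts := PySem.Dict.counter selected_items
  item_counts.items.foldl (fun st ic => pvFillA ic.1 ic.2 st) ([], [])

-- ===== PORT B =====
-- the 'for i, x in enumerate(...): first.setdefault(x, i)' loop of B
def pvRank (selected_items : List String) : PySem.Dict String Int :=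
  (PySem.List.enumerate selected_items 0).foldl
    (fun d p => if d.contains p.2 then d else d.insert p.2 p.1) PySem.Dict.empty

def distribute_items_among_robots_alt (selected_items : List String) : List String × List String :=
  let first := pvRank selected_items
  -- key=first.get: every element the sort hands to the key is a key of first,
  -- so first.get returns its stored index there (exact); ported as getD
  let grouped := PySem.List.sorted selected_items (fun x => first.getD x 0)
  (PySem.List.slice grouped none (some 3), PySem.List.slice grouped (some 3) (some 6))

-- ===== PRECONDITION & SPEC =====
def Spec_distribute_items_among_robots (selected_items : List String) (out : List String × List String) : Prop := out = distribute_items_among_robots_alt selected_items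
instance (selected_items : List String) (out : List String × List String) : Decidable (Spec_distribute_items_among_robots selected_items out) := by unfold Spec_distribute_items_among_robots; infer_instance

-- ===== CLAIM (what is proved, stated in full; the proofs are below) =====
def Claim_equal_distribute_items_among_robots : Prop := ∀ (selected_items : List String), Dom_distribute_items_among_robots selected_items → Spec_distribute_items_among_robots selected_items (distribute_items_among_robots selected_items)

-- ===== LEMMAS AND PROOFS =====

-- the grouped flattening both sides reduce to: for each distinct item in first-seen
-- order, all of its occurrences
def pvFlat (xs : List String) : List String :=
  (PySem.Set.ofList xs).flatMap (fun k => List.replicate (xs.count k) k)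

-- ===== A side (while-loop invariant), as before =====

-- one while-loop step of A, on a state that is a 3/3-slice of L, extends L by the replicate block
lemma pvFillA_slice (item : String) (count : Int) (L : List String) :
    pvFillA item count (L.take 3, (L.drop 3).take 3)
      = ((L ++ List.replicate count.toNat item).take 3,
         ((L ++ List.replicate count.toNat item).drop 3).take 3) := by
  induction h : count.toNat generalizing count L with
  | zero =>
      rw [pvFillA]
      have : ¬ count > 0 := by omega
      simp [this]
  | succ n ih =>
      rw [pvFillA]
      have hc : count > 0 := by omega
      have hrep : List.replicate count.toNat item = item :: List.replicate n item := by
        rw [h]; rfl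
      simp only [hc, dif_pos]
      by_cases h1 : L.length < 3
      · have ht : (L.take 3).length < 3 := by simp; omega
        simp only [ht, if_pos]
        have e1 : L.take 3 ++ [item] = (L ++ [item]).take 3 := by
          rw [List.take_append]; simp; omega
        have e2 : (L.drop 3).take 3 = ((L ++ [item]).drop 3).take 3 := by
          rw [List.drop_append]
          have : (3 : Nat) - L.length ≥ 1 := by omega
          simp [List.drop_eq_nil_of_le (by omega : L.length ≤ 3),
                List.drop_eq_nil_iff, this]
        rw [e1, e2, ih (count - 1) (L ++ [item]) (by omega)]
        have hL : L ++ [item] ++ List.replicate n item = L ++ List.replicate (n+1) item := by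
          rw [List.append_assoc]; rfl
        rw [hL]
      · have ht : ¬ (L.take 3).length < 3 := by simp; omega
        simp only [ht, if_false]
        by_cases h2 : L.length < 6
        · have ht2 : ((L.drop 3).take 3).length < 3 := by simp; omega
          simp only [ht2, if_pos]
          have e1 : L.take 3 = (L ++ [item]).take 3 := by
            rw [List.take_append]; simp; omega
          have e2 : (L.drop 3).take 3 ++ [item] = ((L ++ [item]).drop 3).take 3 := by
            rw [List.drop_append_of_le_length (by omega), List.take_append]
            simp; omega
          rw [e1, e2, ih (count - 1) (L ++ [item]) (by omega)]
          have hL : L ++ [item] ++ List.replicate n item = L ++ List.replicate (n+1) item := by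
            rw [List.append_assoc]; rfl
          rw [hL]
        · have ht2 : ¬ ((L.drop 3).take 3).length < 3 := by simp; omega
          simp only [ht2, if_false]
          have e1 : (L ++ List.replicate count.toNat item).take 3 = L.take 3 := by
            rw [List.take_append_of_le_length (by omega)]
          have e2 : ((L ++ List.replicate count.toNat item).drop 3).take 3
              = (L.drop 3).take 3 := by
            rw [List.drop_append_of_le_length (by omega),
                List.take_append_of_le_length (by simp; omega)]
          rw [← h, e1, e2]

-- the foldl over the counter's items keeps the 3/3-slice-of-the-flattened-prefix invariant
lemma pvFoldA_slice (ics : List (String × Int)) (L : List String) :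
    ics.foldl (fun st ic => pvFillA ic.1 ic.2 st) (L.take 3, (L.drop 3).take 3)
      = ((L ++ ics.flatMap (fun ic => List.replicate ic.2.toNat ic.1)).take 3,
         ((L ++ ics.flatMap (fun ic => List.replicate ic.2.toNat ic.1)).drop 3).take 3) := by
  induction ics generalizing L with
  | nil => simp
  | cons ic rest ih =>
      simp only [List.foldl_cons, List.flatMap_cons]
      rw [pvFillA_slice, ih (L ++ List.replicate ic.2.toNat ic.1)]
      simp [List.append_assoc]

-- A's result is the 3/3 slices of pvFlat
lemma pvA_eq_slices (xs : List String) :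
    distribute_items_among_robots xs = ((pvFlat xs).take 3, ((pvFlat xs).drop 3).take 3) := by
  unfold distribute_items_among_robots
  have := pvFoldA_slice ((PySem.Dict.counter xs).items) []
  simp only [List.nil_append, List.take_nil, List.drop_nil] at this
  rw [this, PySem.Dict.items_counter]
  unfold pvFlat
  simp [List.flatMap_map]

-- ===== B side: the stable sort by first-occurrence index equals pvFlat =====

-- idxOf is injective on members of xs
lemma pvIdxOf_inj (xs : List String) (a b : String) (ha : a ∈ xs) (hb : b ∈ xs)
    (h : xs.idxOf a = xs.idxOf b) : a = b := by
  have h1 := List.getElem_idxOf (List.idxOf_lt_length_of_mem ha)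
  have h2 := List.getElem_idxOf (List.idxOf_lt_length_of_mem hb)
  rw [← h1, ← h2]
  congr 1

-- the distinct items in first-seen order have strictly increasing first-occurrence indices
lemma pvDedup_idxOf_strict (xs : List String) :
    (PySem.Set.ofList xs).Pairwise (fun a b => xs.idxOf a < xs.idxOf b) := by
  induction xs using List.reverseRecOn with
  | nil => simp [PySem.Set.ofList]
  | append_singleton l x ih =>
      have hof : PySem.Set.ofList (l ++ [x]) = PySem.Set.add (PySem.Set.ofList l) x := by
        simp [PySem.Set.ofList_eq_foldl]
      rw [hof]
      have hidx : ∀ a ∈ PySem.Set.ofList l, (l ++ [x]).idxOf a = l.idxOf a := by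
        intro a ha
        exact List.idxOf_append_of_mem ((PySem.Set.mem_ofList l a).mp ha)
      by_cases hx : x ∈ l
      · have : PySem.Set.add (PySem.Set.ofList l) x = PySem.Set.ofList l := by
          simp [PySem.Set.add, PySem.Set.contains, (PySem.Set.mem_ofList l x).mpr hx]
        rw [this]
        refine ih.imp_of_mem ?_
        intro a b ha hb hlt
        rw [hidx a ha, hidx b hb]; exact hlt
      · have : PySem.Set.add (PySem.Set.ofList l) x = PySem.Set.ofList l ++ [x] := by
          simp [PySem.Set.add, PySem.Set.contains, PySem.Set.mem_ofList, hx]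
        rw [this, List.pairwise_append]
        refine ⟨ih.imp_of_mem ?_, List.pairwise_singleton _ _, ?_⟩
        · intro a b ha hb hlt
          rw [hidx a ha, hidx b hb]; exact hlt
        intro a ha b hb
        simp only [List.mem_singleton] at hb
        rw [hb, hidx a ha]
        have h1 : l.idxOf a < l.length := List.idxOf_lt_length_of_mem ((PySem.Set.mem_ofList l a).mp ha)
        have h2 : (l ++ [x]).idxOf x = l.length := by
          rw [List.idxOf_append_of_notMem hx]
          simp
        omega

-- count of any v in pvFlat-style flattenings over a nodup index list
lemma pvCount_flatMap (d : List String) (hd : d.Nodup) (c : String → Nat) (v : String) :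
    (d.flatMap (fun k => List.replicate (c k) k)).count v = if v ∈ d then c v else 0 := by
  induction d with
  | nil => simp
  | cons k t ih =>
      simp only [List.flatMap_cons, List.count_append, List.count_replicate]
      have hk : k ∉ t := (List.nodup_cons.mp hd).1
      have ht : t.Nodup := (List.nodup_cons.mp hd).2
      rw [ih ht]
      by_cases hv : v = k
      · subst hv
        simp [hk]
      · simp [hv, Ne.symm hv, List.mem_cons]

-- pvFlat is a permutation of xs
lemma pvFlat_perm (xs : List String) : (pvFlat xs).Perm xs := by
  rw [List.perm_iff_count]
  intro v
  unfold pvFlat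
  rw [pvCount_flatMap _ (PySem.Set.nodup_ofList xs) _ v]
  by_cases hv : v ∈ xs
  · simp [(PySem.Set.mem_ofList xs v).mpr hv]
  · have : v ∉ PySem.Set.ofList xs := fun h => hv ((PySem.Set.mem_ofList xs v).mp h)
    simp [this, List.count_eq_zero.mpr hv]

-- pvFlat is sorted (weakly) by first-occurrence index
lemma pvFlat_pairwise (xs : List String) :
    (pvFlat xs).Pairwise (fun a b => xs.idxOf a ≤ xs.idxOf b) := by
  unfold pvFlat
  rw [List.flatMap, List.pairwise_flatten]
  constructor
  · intro l hl
    simp only [List.mem_map] at hl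
    obtain ⟨k, _, rfl⟩ := hl
    exact List.pairwise_replicate.mpr (Or.inr (le_refl _))
  · rw [List.pairwise_map]
    refine (pvDedup_idxOf_strict xs).imp_of_mem ?_
    intro a b _ _ hlt x hx y hy
    rw [List.eq_of_mem_replicate hx, List.eq_of_mem_replicate hy]
    omega

-- members of pvFlat are members of xs
lemma pvFlat_mem (xs : List String) (a : String) (ha : a ∈ pvFlat xs) : a ∈ xs :=
  (pvFlat_perm xs).mem_iff.mp ha

-- the setdefault loop stores each member's first-occurrence index
lemma pvRank_get? (xs : List String) (y : String) :
    (pvRank xs).get? y = if y ∈ xs then some ((xs.idxOf y : Nat) : Int) else none := by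
  induction xs using List.reverseRecOn generalizing y with
  | nil => simp [pvRank, PySem.Dict.get?_empty, PySem.List.enumerate]
  | append_singleton l x ih =>
      have hstep : pvRank (l ++ [x])
          = if (pvRank l).contains x then pvRank l else (pvRank l).insert x (l.length : Int) := by
        unfold pvRank
        rw [PySem.List.enumerate_append, List.foldl_append]
        simp [PySem.List.enumerate]
      have hcont : (pvRank l).contains x = decide (x ∈ l) := by
        rw [PySem.Dict.contains_eq_isSome_get?, ih x]
        by_cases hx : x ∈ l <;> simp [hx]
      rw [hstep, hcont]
      by_cases hx : x ∈ l
      · simp only [hx, decide_true, if_true]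
        rw [ih y]
        by_cases hy : y ∈ l
        · simp [hy, List.mem_append.mpr (Or.inl hy), List.idxOf_append_of_mem hy]
        · have : y ∈ l ++ [x] ↔ y = x := by simp [List.mem_append, hy]
          by_cases hyx : y = x
          · exact absurd (hyx ▸ hx) hy
          · simp [hy, this, hyx]
      · simp only [hx, decide_false, Bool.false_eq_true, if_false]
        rw [PySem.Dict.get?_insert, ih y]
        by_cases hyx : y = x
        · have hidx : (l ++ [x]).idxOf y = l.length := by
            rw [hyx, List.idxOf_append_of_notMem hx]; simp
          have hmem : y ∈ l ++ [x] := by simp [hyx]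
          rw [if_pos hmem, hidx, hyx]
          simp
        · by_cases hy : y ∈ l
          · simp [hyx, hy, List.mem_append.mpr (Or.inl hy), List.idxOf_append_of_mem hy]
          · have : ¬ y ∈ l ++ [x] := by simp [List.mem_append, hy, hyx]
            simp [hyx, hy, this]

-- on members, B's sort key is the first-occurrence index
lemma pvRank_getD (xs : List String) (y : String) (hy : y ∈ xs) :
    (pvRank xs).getD y 0 = ((xs.idxOf y : Nat) : Int) := by
  rw [PySem.Dict.getD_eq_get?_getD, pvRank_get?]
  simp [hy]

-- the stable sort by first-occurrence index IS pvFlat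
lemma pvSorted_eq_pvFlat (xs : List String) :
    PySem.List.sorted xs (fun x => (pvRank xs).getD x 0) = pvFlat xs := by
  refine List.Perm.eq_of_pairwise ?_ (PySem.List.sorted_pairwise xs _) ?_
    ((PySem.List.sorted_perm xs _ false).trans (pvFlat_perm xs).symm)
  · intro a b ha hb hab hba
    have ha' : a ∈ xs := (PySem.List.mem_sorted xs _ false a).mp ha
    have hb' : b ∈ xs := pvFlat_mem xs b hb
    rw [pvRank_getD xs a ha', pvRank_getD xs b hb'] at hab hba
    exact pvIdxOf_inj xs a b ha' hb' (by exact_mod_cast le_antisymm hab hba)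
  · refine (pvFlat_pairwise xs).imp_of_mem ?_
    intro a b ha hb hle
    rw [pvRank_getD xs a (pvFlat_mem xs a ha), pvRank_getD xs b (pvFlat_mem xs b hb)]
    exact_mod_cast hle

-- ===== VERDICT (by name: the statement is the Claim_ definition above) =====
theorem distribute_items_among_robots_spec : Claim_equal_distribute_items_among_robots := by
  intro xs _
  show _ = _
  rw [pvA_eq_slices]
  unfold distribute_items_among_robots_alt
  show _ = (PySem.List.slice (PySem.List.sorted xs fun x => (pvRank xs).getD x 0) none (some ((3:Nat):Int)),
            PySem.List.slice (PySem.List.sorted xs fun x => (pvRank xs).getD x 0) (some ((3:Nat):Int)) (some ((6:Nat):Int)))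
  rw [pvSorted_eq_pvFlat, PySem.List.slice_to_natCast, PySem.List.slice_natCast]
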